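-- pv_equiv track=rewrite | github.com/chenzunh23/add_radar | visualize_pkl_new.py | classify_joints
-- ===== SOURCE A (Python) =====
-- def classify_joints(joint_names):
--     """将关节分类为不同类型"""
--     # 四肢末端关节
--     limb_end_names = [
--         'LeftHand', 'RightHand', 'LeftToeBase', 'RightToeBase',
--         'LeftFoot', 'RightFoot', 'LeftToe_End', 'RightToe_End'
--     ]
--
--     # 头部关节
--     head_names = ['Head', 'Neck', 'Neck1']
--
--     # 根节点
--     root_names = ['Hips', 'Hip']
--
--     # 雷达关节
--     radar_names = ['Mid360Radar', 'radar', 'Radar']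
--
--     classification = {}
--     for i, name in enumerate(joint_names):
--         if name in root_names:
--             classification[i] = 'root'
--         elif name in radar_names:
--             classification[i] = 'radar'
--         elif name in limb_end_names:
--             classification[i] = 'limb_end'
--         elif name in head_names:
--             classification[i] = 'head'
--         else:
--             classification[i] = 'normal'
--
--     return classification
-- ===== SOURCE B (Python) =====
-- _CATEGORIES = (
--     ('root', ('Hips', 'Hip')),
--     ('radar', ('Mid360Radar', 'radar', 'Radar')),
--     ('limb_end', ('LeftHand', 'RightHand', 'LeftToeBase', 'RightToeBase',
--                   'LeftFoot', 'RightFoot', 'LeftToe_End', 'RightToe_End')),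
--     ('head', ('Head', 'Neck', 'Neck1')),
-- )
--
-- def classify_joints(joint_names):
--     """将关节分类为不同类型"""
--     # default everything to 'normal', then overwrite category-major via an inverted index
--     classification = {i: 'normal' for i in range(len(joint_names))}
--     positions = {}
--     for i, name in enumerate(joint_names):
--         positions.setdefault(name, []).append(i)
--     for label, names in _CATEGORIES:
--         for nm in names:
--             for i in positions.get(nm, ()):
--                 classification[i] = label
--     return classification
-- ===== Notes on version B (the rewrite author's own statement) =====
-- stated objective: alternative
-- what changed: Instead of testing each name against four lists inside one loop, B defaults every index to 'normal', builds an inverted index (name -> list of indices) in one pass, and then writes each category label category-major through that index; the per-name branch chain disappears.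
import Mathlib
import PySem

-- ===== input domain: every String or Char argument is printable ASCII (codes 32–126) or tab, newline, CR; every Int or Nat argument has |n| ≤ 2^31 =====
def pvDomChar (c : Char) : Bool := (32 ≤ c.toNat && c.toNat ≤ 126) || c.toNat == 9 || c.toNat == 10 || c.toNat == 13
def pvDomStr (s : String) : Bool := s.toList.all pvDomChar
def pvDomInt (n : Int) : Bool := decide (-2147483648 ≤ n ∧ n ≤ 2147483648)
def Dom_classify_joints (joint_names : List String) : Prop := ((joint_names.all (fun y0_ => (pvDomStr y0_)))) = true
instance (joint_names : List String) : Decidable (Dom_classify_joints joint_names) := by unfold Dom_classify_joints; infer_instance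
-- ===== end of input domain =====

-- B replaces A's per-name chain of four membership tests by: default every index to
-- 'normal', build an inverted index name→indices in one pass, then overwrite the labels
-- category-major through that index (alternative algorithm; same result).

-- ===== PORT A =====
def classify_joints (joint_names : List String) : List (Int × String) :=
  let limb_end_names : List String :=
    ["LeftHand", "RightHand", "LeftToeBase", "RightToeBase",
     "LeftFoot", "RightFoot", "LeftToe_End", "RightToe_End"]
  let head_names : List String := ["Head", "Neck", "Neck1"]
  let root_names : List String := ["Hips", "Hip"]
  let radar_names : List String := ["Mid360Radar", "radar", "Radar"]
  let classification : PySem.Dict Int String :=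
    (PySem.List.enumerate joint_names 0).foldl (fun d p =>
      if p.2 ∈ root_names then d.insert p.1 "root"
      else if p.2 ∈ radar_names then d.insert p.1 "radar"
      else if p.2 ∈ limb_end_names then d.insert p.1 "limb_end"
      else if p.2 ∈ head_names then d.insert p.1 "head"
      else d.insert p.1 "normal") PySem.Dict.empty
  classification.items

-- ===== PORT B =====
def pvCategories : List (String × List String) :=
  [("root", ["Hips", "Hip"]),
   ("radar", ["Mid360Radar", "radar", "Radar"]),
   ("limb_end", ["LeftHand", "RightHand", "LeftToeBase", "RightToeBase",
                 "LeftFoot", "RightFoot", "LeftToe_End", "RightToe_End"]),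
   ("head", ["Head", "Neck", "Neck1"])]

def classify_joints_alt (joint_names : List String) : List (Int × String) :=
  let classification0 : PySem.Dict Int String :=
    (PySem.List.pyRange 0 (joint_names.length : Int) 1).foldl
      (fun d i => d.insert i "normal") PySem.Dict.empty
  let positions : PySem.Dict String (List Int) :=
    (PySem.List.enumerate joint_names 0).foldl
      (fun d p => d.modify p.2 [] (· ++ [p.1])) PySem.Dict.empty
  let final : PySem.Dict Int String :=
    pvCategories.foldl (fun d c =>
      c.2.foldl (fun d nm =>
        (positions.getD nm []).foldl (fun d i => d.insert i c.1) d) d) classification0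
  final.items

-- ===== PRECONDITION & SPEC =====
def Spec_classify_joints (joint_names : List String) (out : List (Int × String)) : Prop := out = classify_joints_alt joint_names
instance (joint_names : List String) (out : List (Int × String)) : Decidable (Spec_classify_joints joint_names out) := by unfold Spec_classify_joints; infer_instance

-- ===== CLAIM (what is proved, stated in full; the proofs are below) =====
def Claim_equal_classify_joints : Prop := ∀ (joint_names : List String), Dom_classify_joints joint_names → Spec_classify_joints joint_names (classify_joints joint_names)

-- ===== LEMMAS AND PROOFS =====

-- A's if/elif chain, as a function of the name alone
def pvCatA (name : String) : String :=
  if name ∈ (["Hips", "Hip"] : List String) then "root"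
  else if name ∈ (["Mid360Radar", "radar", "Radar"] : List String) then "radar"
  else if name ∈ (["LeftHand", "RightHand", "LeftToeBase", "RightToeBase",
                   "LeftFoot", "RightFoot", "LeftToe_End", "RightToe_End"] : List String) then "limb_end"
  else if name ∈ (["Head", "Neck", "Neck1"] : List String) then "head"
  else "normal"

-- the inverted index lists B reads
def pvIdx (joint_names : List String) (nm : String) : List Int :=
  ((PySem.List.enumerate joint_names 0).filter (fun p => p.2 == nm)).map (·.1)

-- A's items are the enumerate pairs labelled by pvCatA
theorem pvA_items (joint_names : List String) :
    classify_joints joint_names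
      = (PySem.List.enumerate joint_names 0).map (fun p => (p.1, pvCatA p.2)) := by
  unfold classify_joints
  have hfresh : ∀ p ∈ PySem.List.enumerate joint_names 0,
      (PySem.Dict.empty : PySem.Dict Int String).contains p.1 = false := by
    intro p _; simp [PySem.Dict.contains_empty]
  have hnodup : ((PySem.List.enumerate joint_names 0).map Prod.fst).Nodup := by
    rw [PySem.List.map_fst_enumerate]
    exact PySem.List.nodup_pyRange_one _ _
  have hbody : (fun (d : PySem.Dict Int String) (p : Int × String) =>
      if p.2 ∈ (["Hips", "Hip"] : List String) then d.insert p.1 "root"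
      else if p.2 ∈ (["Mid360Radar", "radar", "Radar"] : List String) then d.insert p.1 "radar"
      else if p.2 ∈ (["LeftHand", "RightHand", "LeftToeBase", "RightToeBase",
                      "LeftFoot", "RightFoot", "LeftToe_End", "RightToe_End"] : List String) then d.insert p.1 "limb_end"
      else if p.2 ∈ (["Head", "Neck", "Neck1"] : List String) then d.insert p.1 "head"
      else d.insert p.1 "normal")
      = (fun d p => d.insert p.1 (pvCatA p.2)) := by
    funext d p
    unfold pvCatA
    split_ifs <;> rfl
  simp only
  rw [hbody, PySem.Dict.items_foldl_insert_fresh _ _ _ _ hfresh hnodup]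
  rw [show (PySem.Dict.empty : PySem.Dict Int String).items = [] from rfl, List.nil_append]

-- the positions dict B builds is exactly pvIdx
theorem pvPositions_getD (joint_names : List String) (nm : String) :
    ((PySem.List.enumerate joint_names 0).foldl
      (fun d p => d.modify p.2 [] (· ++ [p.1])) PySem.Dict.empty).getD nm []
      = pvIdx joint_names nm := by
  have hswap : (PySem.List.enumerate joint_names 0).foldl
      (fun (d : PySem.Dict String (List Int)) p => d.modify p.2 [] (· ++ [p.1])) PySem.Dict.empty
      = ((PySem.List.enumerate joint_names 0).map Prod.swap).foldl
      (fun d p => d.modify p.1 [] (· ++ [p.2])) PySem.Dict.empty := by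
    rw [List.foldl_map]
    rfl
  rw [hswap, PySem.Dict.getD_foldl_modify_append]
  unfold pvIdx
  simp only [PySem.Dict.getD_empty, List.nil_append, List.filter_map, List.map_map]
  rfl

-- getD after one overwrite pass
theorem pvPass_getD (L : List Int) (lab : String) (d : PySem.Dict Int String) (k : Int) (dflt : String) :
    (L.foldl (fun d i => d.insert i lab) d).getD k dflt
      = if k ∈ L then lab else d.getD k dflt := by
  induction L generalizing d with
  | nil => simp
  | cons a L ih =>
    simp only [List.foldl_cons, ih, PySem.Dict.getD_insert, List.mem_cons]
    by_cases hL : k ∈ L <;> by_cases ha : k = a <;> simp [hL, ha]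

-- getD after one category (fold over its name list)
theorem pvNames_getD (names : List String) (lab : String) (pos : PySem.Dict String (List Int))
    (d : PySem.Dict Int String) (k : Int) (dflt : String) :
    (names.foldl (fun d nm => (pos.getD nm []).foldl (fun d i => d.insert i lab) d) d).getD k dflt
      = if ∃ nm ∈ names, k ∈ pos.getD nm [] then lab else d.getD k dflt := by
  induction names generalizing d with
  | nil => simp
  | cons nm names ih =>
    simp only [List.foldl_cons, ih, pvPass_getD]
    by_cases h1 : ∃ x ∈ names, k ∈ pos.getD x []
    · simp [h1]
    · by_cases h2 : k ∈ pos.getD nm [] <;> simp [h1, h2]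

-- getD after the whole category-major overwrite fold
theorem pvCats_getD (cats : List (String × List String)) (pos : PySem.Dict String (List Int))
    (d : PySem.Dict Int String) (k : Int) (dflt : String) :
    (cats.foldl (fun d c =>
        c.2.foldl (fun d nm => (pos.getD nm []).foldl (fun d i => d.insert i c.1) d) d) d).getD k dflt
      = cats.foldl (fun acc c => if ∃ nm ∈ c.2, k ∈ pos.getD nm [] then c.1 else acc) (d.getD k dflt) := by
  induction cats generalizing d with
  | nil => rfl
  | cons c cats ih =>
    simp only [List.foldl_cons, ih, pvNames_getD]

-- membership in pvIdx, for a pair of the enumeration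
theorem pvMem_idx (joint_names : List String) (nm : String) (p : Int × String)
    (hp : p ∈ PySem.List.enumerate joint_names 0) :
    p.1 ∈ pvIdx joint_names nm ↔ p.2 = nm := by
  have hnodup : ((PySem.List.enumerate joint_names 0).map Prod.fst).Nodup := by
    rw [PySem.List.map_fst_enumerate]; exact PySem.List.nodup_pyRange_one _ _
  constructor
  · intro h
    unfold pvIdx at h
    rcases List.mem_map.mp h with ⟨q, hq, hq1⟩
    rcases List.mem_filter.mp hq with ⟨hqmem, hqnm⟩
    have : q = p := List.inj_on_of_nodup_map hnodup hqmem hp hq1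
    subst this
    exact beq_iff_eq.mp hqnm
  · intro h
    unfold pvIdx
    exact List.mem_map.mpr ⟨p, List.mem_filter.mpr ⟨hp, beq_iff_eq.mpr h⟩, rfl⟩

-- pvIdx lists only contain enumerate keys
theorem pvIdx_subset (joint_names : List String) (nm : String) (i : Int)
    (h : i ∈ pvIdx joint_names nm) :
    i ∈ PySem.List.pyRange 0 (joint_names.length : Int) 1 := by
  unfold pvIdx at h
  rcases List.mem_map.mp h with ⟨q, hq, hq1⟩
  have : q.1 ∈ (PySem.List.enumerate joint_names 0).map Prod.fst :=
    List.mem_map.mpr ⟨q, (List.mem_filter.mp hq).1, rfl⟩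
  rw [PySem.List.map_fst_enumerate] at this
  simpa [hq1] using this

-- Set.update is the identity when every new element is already present
theorem pvSet_update_self (s xs : List Int) (h : ∀ x ∈ xs, x ∈ s) :
    PySem.Set.update s xs = s := by
  induction xs generalizing s with
  | nil => rfl
  | cons a xs ih =>
    have ha : PySem.Set.add s a = s := by
      have ha' : a ∈ s := h a (by simp)
      unfold PySem.Set.add
      simp [ha']
    show PySem.Set.update (PySem.Set.add s a) xs = s
    rw [ha]
    exact ih s (fun x hx => h x (by simp [hx]))

-- keys unchanged by one overwrite pass
theorem pvPass_keys (L : List Int) (lab : String) (d : PySem.Dict Int String)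
    (h : ∀ i ∈ L, i ∈ d.keys) :
    (L.foldl (fun d i => d.insert i lab) d).keys = d.keys := by
  rw [PySem.Dict.keys_foldl_insert (f := fun _ _ => lab)]
  exact pvSet_update_self _ _ h

-- keys unchanged by one category pass
theorem pvNames_keys (names : List String) (lab : String) (pos : PySem.Dict String (List Int))
    (d : PySem.Dict Int String) (h : ∀ nm ∈ names, ∀ i ∈ pos.getD nm [], i ∈ d.keys) :
    (names.foldl (fun d nm => (pos.getD nm []).foldl (fun d i => d.insert i lab) d) d).keys = d.keys := by
  induction names generalizing d with
  | nil => rfl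
  | cons nm names ih =>
    simp only [List.foldl_cons]
    have hk : ((pos.getD nm []).foldl (fun d i => d.insert i lab) d).keys = d.keys :=
      pvPass_keys _ _ _ (h nm (by simp))
    rw [ih _ (fun x hx i hi => by rw [hk]; exact h x (by simp [hx]) i hi), hk]

-- keys unchanged by the whole category-major overwrite fold
theorem pvCats_keys (cats : List (String × List String)) (pos : PySem.Dict String (List Int))
    (d : PySem.Dict Int String)
    (h : ∀ c ∈ cats, ∀ nm ∈ c.2, ∀ i ∈ pos.getD nm [], i ∈ d.keys) :
    (cats.foldl (fun d c =>
        c.2.foldl (fun d nm => (pos.getD nm []).foldl (fun d i => d.insert i c.1) d) d) d).keys = d.keys := by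
  induction cats generalizing d with
  | nil => rfl
  | cons c cats ih =>
    simp only [List.foldl_cons]
    have hk : ((c.2.foldl (fun d nm => (pos.getD nm []).foldl (fun d i => d.insert i c.1) d) d)).keys = d.keys :=
      pvNames_keys _ _ _ _ (h c (by simp))
    rw [ih _ (fun x hx nm hnm i hi => by rw [hk]; exact h x (by simp [hx]) nm hnm i hi), hk]

-- items of a dict with Nodup keys, read back through getD
theorem pvItems_eq_keys_map (d : PySem.Dict Int String) (dflt : String)
    (h : d.keys.Nodup) :
    d.items = d.keys.map (fun k => (k, d.getD k dflt)) := by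
  have h1 : d.keys.map (fun k => (k, d.getD k dflt))
      = d.items.map (fun p => (p.1, d.getD p.1 dflt)) := by
    show (d.items.map (·.1)).map _ = _
    rw [List.map_map]
    rfl
  have h2 : d.items.map (fun p => (p.1, d.getD p.1 dflt)) = d.items := by
    conv_rhs => rw [← List.map_id d.items]
    apply List.map_congr_left
    intro p hp
    obtain ⟨k, v⟩ := p
    simp [PySem.Dict.getD_of_mem_items d hp h dflt]
  rw [h1, h2]

theorem classify_joints_spec : Claim_equal_classify_joints := by
  intro joint_names _
  unfold Spec_classify_joints
  rw [pvA_items]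
  unfold classify_joints_alt
  simp only
  set n : Int := (joint_names.length : Int) with hn
  set pos : PySem.Dict String (List Int) :=
    (PySem.List.enumerate joint_names 0).foldl
      (fun d p => d.modify p.2 [] (· ++ [p.1])) PySem.Dict.empty with hpos
  set d0 : PySem.Dict Int String :=
    (PySem.List.pyRange 0 n 1).foldl (fun d i => d.insert i "normal") PySem.Dict.empty with hd0
  set F : PySem.Dict Int String :=
    pvCategories.foldl (fun d c =>
      c.2.foldl (fun d nm =>
        (pos.getD nm []).foldl (fun d i => d.insert i c.1) d) d) d0 with hF
  have hposD : ∀ nm, pos.getD nm [] = pvIdx joint_names nm := fun nm => pvPositions_getD _ _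
  -- keys of d0
  have hd0keys : d0.keys = PySem.List.pyRange 0 n 1 := by
    rw [hd0]
    have hit : ((PySem.List.pyRange 0 n 1).foldl (fun d i => d.insert i "normal")
        (PySem.Dict.empty : PySem.Dict Int String)).items
        = (PySem.Dict.empty : PySem.Dict Int String).items
          ++ (PySem.List.pyRange 0 n 1).map (fun i => ((id i : Int), "normal")) :=
      PySem.Dict.items_foldl_insert_fresh _ _ _ _
        (fun a _ => by simp [PySem.Dict.contains_empty])
        (by simpa using PySem.List.nodup_pyRange_one 0 n)
    show ((PySem.List.pyRange 0 n 1).foldl (fun d i => d.insert i "normal")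
        (PySem.Dict.empty : PySem.Dict Int String)).items.map (·.1) = _
    rw [hit, show (PySem.Dict.empty : PySem.Dict Int String).items = [] from rfl]
    simp only [List.nil_append, List.map_map]
    rw [show List.map ((fun (x : Int × String) => x.1) ∘ fun (i : Int) => (id i, "normal"))
        (PySem.List.pyRange 0 n 1) = List.map id (PySem.List.pyRange 0 n 1) from
      List.map_congr_left (fun i _ => rfl), List.map_id]
  -- keys of F
  have hFkeys : F.keys = PySem.List.pyRange 0 n 1 := by
    rw [hF, pvCats_keys _ _ _ (fun c _ nm _ i hi => by
      rw [hd0keys]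
      exact pvIdx_subset joint_names nm i (by rwa [hposD] at hi))]
    exact hd0keys
  -- getD through F, for an enumerate pair
  have hFgetD : ∀ p ∈ PySem.List.enumerate joint_names 0, F.getD p.1 "normal" = pvCatA p.2 := by
    intro p hp
    have hmem : ∀ nm, (p.1 ∈ pos.getD nm []) ↔ p.2 = nm := by
      intro nm; rw [hposD]; exact pvMem_idx joint_names nm p hp
    rw [hF, pvCats_getD, hd0, pvPass_getD]
    simp only [PySem.Dict.getD_empty, ite_self]
    unfold pvCategories pvCatA
    simp only [List.foldl_cons, List.foldl_nil, List.mem_cons, List.not_mem_nil, or_false,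
      exists_eq_or_imp, exists_eq_left, hmem]
    by_cases hall : p.2 ∈ (["Hips", "Hip", "Mid360Radar", "radar", "Radar",
        "LeftHand", "RightHand", "LeftToeBase", "RightToeBase", "LeftFoot", "RightFoot",
        "LeftToe_End", "RightToe_End", "Head", "Neck", "Neck1"] : List String)
    · simp only [List.mem_cons, List.not_mem_nil, or_false] at hall
      rcases hall with h|h|h|h|h|h|h|h|h|h|h|h|h|h|h|h <;> rw [h] <;> decide
    · simp only [List.mem_cons, List.not_mem_nil, or_false, not_or] at hall
      obtain ⟨n1, n2, n3, n4, n5, n6, n7, n8, n9, n10, n11, n12, n13, n14, n15, n16⟩ := hall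
      simp [n1, n2, n3, n4, n5, n6, n7, n8, n9, n10, n11, n12, n13, n14, n15, n16]
  -- assemble
  have hNodup : F.keys.Nodup := by rw [hFkeys]; exact PySem.List.nodup_pyRange_one _ _
  rw [pvItems_eq_keys_map F "normal" hNodup, hFkeys]
  have hrange : PySem.List.pyRange 0 n 1 = (PySem.List.enumerate joint_names 0).map Prod.fst := by
    rw [PySem.List.map_fst_enumerate]; simp [hn]
  rw [hrange, List.map_map]
  exact (List.map_congr_left (fun p hp => by
    simp only [Function.comp]
    rw [hFgetD p hp])).symm
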